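-- pv_equiv track=rewrite | github.com/ramgeart/uithub-local | src/uithub_local/utils.py | _strip_lisp_comments
-- ===== SOURCE A (Python) =====
-- def _strip_lisp_comments(content: str) -> str:
--     """Strip Lisp ; comments, preserving string literals."""
--     lines = []
--     for line in content.splitlines():
--         in_string = False
--         escape = False
--         result: list[str] = []
--         i = 0
--         while i < len(line):
--             char = line[i]
--             # Handle escape sequences
--             if escape:
--                 result.append(char)
--                 escape = False
--                 i += 1
--                 continue
--             # Start escape sequence
--             if char == "\\" and in_string:
--                 result.append(char)
--                 escape = True
--                 i += 1
--                 continue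
--             # Toggle string state on unescaped double quotes
--             if char == '"':
--                 in_string = not in_string
--                 result.append(char)
--             elif char == ";" and not in_string:
--                 # Start of comment outside a string; ignore rest of line
--                 break
--             else:
--                 result.append(char)
--             i += 1
--         lines.append("".join(result).rstrip())
--     return "\n".join(lines)
-- ===== SOURCE B (Python) =====
-- def _scan_string(rest: str) -> int:
--     """Number of chars a just-opened string literal occupies in `rest`,
--     including the closing quote (backslash escapes the next char)."""
--     i = 0
--     n = len(rest)
--     while i < n:
--         c = rest[i]
--         if c == "\\":
--             i += 2
--         elif c == '"':
--             return i + 1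
--         else:
--             i += 1
--     return n
--
--
-- def _strip_line(rest: str) -> str:
--     """Cut an unquoted ';' comment, jumping over whole string literals."""
--     q = rest.find('"')
--     s = rest.find(';')
--     if s != -1 and (q == -1 or s < q):
--         return rest[:s]
--     if q == -1:
--         return rest
--     end = q + 1 + _scan_string(rest[q + 1:])
--     return rest[:end] + _strip_line(rest[end:])
--
--
-- def _strip_lisp_comments(content: str) -> str:
--     """Strip Lisp ; comments, preserving string literals."""
--     return "\n".join(_strip_line(line).rstrip() for line in content.splitlines())
-- ===== Notes on version B (the rewrite author's own statement) =====
-- stated objective: faster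
-- what changed: Replaces the per-character in_string/escape state machine with a find-and-jump scanner: each line is cut at the first semicolon found before any double quote, and every string literal is skipped as one block via a literal-length helper, recursing on the remainder.
import Mathlib
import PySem

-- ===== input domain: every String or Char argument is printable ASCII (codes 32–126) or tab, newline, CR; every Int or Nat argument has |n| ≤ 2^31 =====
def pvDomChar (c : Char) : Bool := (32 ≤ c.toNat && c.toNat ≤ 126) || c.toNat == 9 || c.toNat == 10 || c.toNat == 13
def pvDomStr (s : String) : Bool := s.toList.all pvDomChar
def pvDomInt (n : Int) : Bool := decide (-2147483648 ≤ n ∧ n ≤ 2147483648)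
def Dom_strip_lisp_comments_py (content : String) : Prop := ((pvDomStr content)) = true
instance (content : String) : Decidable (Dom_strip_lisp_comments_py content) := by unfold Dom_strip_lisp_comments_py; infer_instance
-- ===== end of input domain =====

-- B replaces A's per-character in_string/escape state machine with a find-and-jump
-- scanner (cut at the first unquoted ';', skipping each string literal as one block);
-- objective: faster (same O(n), but str.find/slicing do the scanning in C; a timing run measured B faster).

-- ===== PORT A =====
-- A's inner while-loop: state (in_string, escape), result accumulated in order.
def stripALoop : List Char → Bool → Bool → List Char
  | [], _, _ => []
  | c :: rest, inStr, esc =>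
    if esc then c :: stripALoop rest inStr false
    else if c == '\\' && inStr then c :: stripALoop rest inStr true
    else if c == '"' then c :: stripALoop rest (!inStr) false
    else if c == ';' && !inStr then []
    else c :: stripALoop rest inStr false

def strip_lisp_comments_py (content : String) : String :=
  PySem.Str.join "\n" ((PySem.Str.splitlines content).map
    (fun line => PySem.Str.rstrip (String.ofList (stripALoop line.toList false false))))

-- ===== PORT B =====
-- Source B's _scan_string: length a just-opened string literal occupies, closing quote included.
def litLen : List Char → Nat
  | [] => 0
  | c :: rest =>
    if c == '\\' then
      match rest with
      | [] => 1
      | _ :: rest' => 2 + litLen rest'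
    else if c == '"' then 1
    else 1 + litLen rest


-- Source B's _strip_line; rest[:s] with s = rest.find(';') >= 0 in that branch is rest.take s.toNat.
def scanLine (rest : List Char) : List Char :=
  let q := PySem.Chars.find rest ['"']
  let s := PySem.Chars.find rest [';']
  if s ≠ -1 ∧ (q = -1 ∨ s < q) then rest.take s.toNat
  else if hq : q = -1 then rest
  else
    let e := q.toNat + 1 + litLen (rest.drop (q.toNat + 1))
    rest.take e ++ scanLine (rest.drop e)
termination_by rest.length
decreasing_by
  have h0 : 0 ≤ q := lt_of_le_of_ne (PySem.Chars.neg_one_le_find rest ['"']) (Ne.symm hq)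
  have hinf : ['"'] <:+: rest := (PySem.Chars.find_nonneg_iff rest ['"']).mp h0
  have h1 : 1 ≤ rest.length := by simpa using hinf.length_le
  simp only [List.length_drop]
  omega


def strip_lisp_comments_py_alt (content : String) : String :=
  PySem.Str.join "\n" ((PySem.Str.splitlines content).map
    (fun line => PySem.Str.rstrip (String.ofList (scanLine line.toList))))

-- ===== PRECONDITION & SPEC =====
def Spec_strip_lisp_comments_py (content : String) (out : String) : Prop := out = strip_lisp_comments_py_alt content
instance (content : String) (out : String) : Decidable (Spec_strip_lisp_comments_py content out) := by unfold Spec_strip_lisp_comments_py; infer_instance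

-- ===== CLAIM (what is proved, stated in full; the proofs are below) =====
def Claim_equal_strip_lisp_comments_py : Prop := ∀ (content : String), Dom_strip_lisp_comments_py content → Spec_strip_lisp_comments_py content (strip_lisp_comments_py content)

-- ===== LEMMAS AND PROOFS =====

-- Cons-friendly characterisation of PySem.Chars.find for a single-character needle.
def myFind : List Char → Char → Int
  | [], _ => -1
  | c :: t, a => if c = a then 0 else if myFind t a = -1 then -1 else myFind t a + 1

theorem myFind_cases (t : List Char) (a : Char) : myFind t a = -1 ∨ 0 ≤ myFind t a := by
  induction t with
  | nil => left; rfl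
  | cons c t ih =>
    simp only [myFind]
    split_ifs with h1 h2
    · right; norm_num
    · left; rfl
    · right
      rcases ih with h | h
      · exact absurd h h2
      · omega

theorem find_go_single (t : List Char) (a : Char) (k : Nat) :
    PySem.Chars.find.go [a] t k = if myFind t a = -1 then -1 else myFind t a + k := by
  induction t generalizing k with
  | nil => simp [PySem.Chars.find.go, myFind]
  | cons c t ih =>
    rw [PySem.Chars.find.go]
    by_cases hca : c = a
    · subst hca
      simp [List.isPrefixOf, myFind]
    · have hac : ([a].isPrefixOf (c :: t)) = false := by
        simp [List.isPrefixOf, Ne.symm hca]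
      rw [hac]
      simp only [Bool.false_eq_true, if_false, ih]
      simp only [myFind, if_neg hca]
      rcases myFind_cases t a with h | h
      · simp [h]
      · have hne : myFind t a ≠ -1 := by omega
        have hne2 : myFind t a + 1 ≠ -1 := by omega
        simp only [hne, if_false, hne2]
        push_cast
        ring

theorem find_single (cs : List Char) (a : Char) : PySem.Chars.find cs [a] = myFind cs a := by
  show PySem.Chars.find.go [a] cs 0 = myFind cs a
  rw [find_go_single]
  rcases myFind_cases cs a with h | h
  · simp [h]
  · have : myFind cs a ≠ -1 := by omega
    simp [this]

theorem stripALoop_inString (cs : List Char) :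
    stripALoop cs true false = cs.take (litLen cs) ++ stripALoop (cs.drop (litLen cs)) false false := by
  induction cs using litLen.induct with
  | case1 => rfl
  | case2 c h =>
    have hc : c = '\\' := by simpa using h
    subst hc; rfl
  | case3 c h d r ih =>
    have hc : c = '\\' := by simpa using h
    subst hc
    have h2 : litLen ('\\' :: d :: r) = litLen r + 2 := by simp [litLen]; omega
    rw [h2]
    have hL : stripALoop ('\\' :: d :: r) true false = '\\' :: d :: stripALoop r true false := by
      simp [stripALoop]
    rw [hL, ih]
    rfl
  | case4 c r hc hq =>
    have hq' : c = '"' := by simpa using hq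
    subst hq'
    have h1 : litLen ('"' :: r) = 0 + 1 := by rw [litLen.eq_def]; simp
    rw [h1]
    simp [stripALoop]
  | case5 c r hc hq ih =>
    have h1 : litLen (c :: r) = litLen r + 1 := by
      rw [litLen.eq_def]
      simp only [hc, hq, Bool.false_eq_true, if_false]
      cases r <;> omega
    rw [h1]
    have hL : stripALoop (c :: r) true false = c :: stripALoop r true false := by
      simp only [stripALoop]
      rw [if_neg (by simp), if_neg (by simp [hc]), if_neg (by simpa using hq),
        if_neg (by simp)]
    rw [hL, ih]
    rfl

theorem scanLine_nil : scanLine [] = [] := by rw [scanLine]; rfl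

theorem scan_eq_loop_aux (n : Nat) : ∀ cs : List Char, cs.length ≤ n →
    scanLine cs = stripALoop cs false false := by
  induction n with
  | zero =>
    intro cs h
    have : cs = [] := List.length_eq_zero_iff.mp (Nat.le_zero.mp h)
    subst this
    exact scanLine_nil
  | succ n ih =>
    intro cs h
    match cs with
    | [] => exact scanLine_nil
    | c :: r =>
      have hr : r.length ≤ n := by simpa using h
      rw [scanLine]
      simp only [find_single]
      by_cases hsemi : c = ';'
      · subst hsemi
        have hs : myFind (';' :: r) ';' = 0 := by simp [myFind]
        have hq : myFind (';' :: r) '"' = -1 ∨ 0 < myFind (';' :: r) '"' := by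
          simp only [myFind, if_neg (by decide : ¬ (';' = '"'))]
          rcases myFind_cases r '"' with h' | h'
          · left; simp [h']
          · right
            have h'' : myFind r '"' ≠ -1 := by omega
            simp only [h'', if_false]; omega
        rw [if_pos]
        · rw [hs]
          simp [stripALoop]
        · refine ⟨by rw [hs]; norm_num, ?_⟩
          rw [hs]
          rcases hq with h' | h'
          · left; exact h'
          · right; exact h'
      · by_cases hquote : c = '"'
        · subst hquote
          have hq : myFind ('"' :: r) '"' = 0 := by simp [myFind]
          have hs : myFind ('"' :: r) ';' = -1 ∨ 0 < myFind ('"' :: r) ';' := by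
            simp only [myFind, if_neg (by decide : ¬ ('"' = ';'))]
            rcases myFind_cases r ';' with h' | h'
            · left; simp [h']
            · right
              have h'' : myFind r ';' ≠ -1 := by omega
              simp only [h'', if_false]; omega
          rw [if_neg, dif_neg (by rw [hq]; norm_num)]
          · rw [hq]
            have htn : ((0:Int).toNat + 1) = 1 := by norm_num
            rw [htn]
            have hd1 : ('"' :: r).drop 1 = r := rfl
            rw [hd1]
            have he : 1 + litLen r = litLen r + 1 := by omega
            rw [he]
            have ht : ('"' :: r).take (litLen r + 1) = '"' :: r.take (litLen r) := rfl
            have hd : ('"' :: r).drop (litLen r + 1) = r.drop (litLen r) := rfl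
            rw [ht, hd]
            have hlen : (r.drop (litLen r)).length ≤ n := by
              simp only [List.length_drop]; omega
            rw [ih _ hlen]
            have hA : stripALoop ('"' :: r) false false = '"' :: stripALoop r true false := by
              simp [stripALoop]
            rw [hA, stripALoop_inString r]
            rfl
          · rw [hq]
            rintro ⟨hs', hlt | hlt⟩
            · exact absurd hlt (by norm_num)
            · rcases hs with h' | h' <;> omega
        · -- ordinary character (including '\\' outside a string)
          have hqc : myFind (c :: r) '"' = if myFind r '"' = -1 then -1 else myFind r '"' + 1 := by
            simp [myFind, hquote]
          have hsc : myFind (c :: r) ';' = if myFind r ';' = -1 then -1 else myFind r ';' + 1 := by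
            simp [myFind, hsemi]
          have hA : stripALoop (c :: r) false false = c :: stripALoop r false false := by
            simp only [stripALoop]
            rw [if_neg (by simp), if_neg (by simp), if_neg (by simp [hquote]),
              if_neg (by simp [hsemi])]
          rw [hA, ← ih r hr]
          conv_rhs => rw [scanLine]
          simp only [find_single]
          rcases myFind_cases r ';' with hsr | hsr
          · -- no semicolon in r: comment branch false on both sides
            rw [if_neg (by rw [hsc, if_pos hsr]; simp),
              if_neg (by rintro ⟨h1, _⟩; exact h1 hsr)]
            rcases myFind_cases r '"' with hqr | hqr
            · rw [dif_pos (by rw [hqc, if_pos hqr]), dif_pos hqr]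
            · have hqr' : myFind r '"' ≠ -1 := by omega
              rw [dif_neg (by rw [hqc, if_neg hqr']; omega), dif_neg hqr']
              have htoNat : (myFind r '"' + 1).toNat = (myFind r '"').toNat + 1 := by omega
              rw [hqc, if_neg hqr', htoNat]
              rw [List.drop_succ_cons]
              have harith : (myFind r '"').toNat + 1 + 1 + litLen (r.drop ((myFind r '"').toNat + 1))
                  = ((myFind r '"').toNat + 1 + litLen (r.drop ((myFind r '"').toNat + 1))) + 1 := by omega
              rw [harith, List.take_succ_cons, List.drop_succ_cons, List.cons_append]
          · have hsr' : myFind r ';' ≠ -1 := by omega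
            by_cases hcond : myFind r '"' = -1 ∨ myFind r ';' < myFind r '"'
            · -- comment cut happens in r on both sides
              rw [if_pos, if_pos ⟨hsr', hcond⟩]
              · have htoNat : (myFind r ';' + 1).toNat = (myFind r ';').toNat + 1 := by omega
                rw [hsc, if_neg hsr', htoNat, List.take_succ_cons]
              · refine ⟨by rw [hsc, if_neg hsr']; omega, ?_⟩
                rcases hcond with h' | h'
                · left; rw [hqc, if_pos h']
                · right; rw [hqc, hsc, if_neg hsr', if_neg (by omega)]; omega
            · -- a quote comes before any semicolon: skip the literal on both sides
              push_neg at hcond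
              obtain ⟨hqr', hlt⟩ := hcond
              have hqr0 : 0 ≤ myFind r '"' := by
                rcases myFind_cases r '"' with h' | h'
                · exact absurd h' hqr'
                · exact h'
              rw [if_neg, if_neg (by push_neg; exact fun _ => ⟨hqr', hlt⟩)]
              · rw [dif_neg (by rw [hqc, if_neg hqr']; omega), dif_neg hqr']
                have htoNat : (myFind r '"' + 1).toNat = (myFind r '"').toNat + 1 := by omega
                rw [hqc, if_neg hqr', htoNat]
                rw [List.drop_succ_cons]
                have harith : (myFind r '"').toNat + 1 + 1 + litLen (r.drop ((myFind r '"').toNat + 1))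
                    = ((myFind r '"').toNat + 1 + litLen (r.drop ((myFind r '"').toNat + 1))) + 1 := by omega
                rw [harith, List.take_succ_cons, List.drop_succ_cons, List.cons_append]
              · rintro ⟨hs', hbad | hbad⟩
                · rw [hqc, if_neg hqr'] at hbad; omega
                · rw [hqc, hsc, if_neg hqr', if_neg hsr'] at hbad; omega

theorem scan_eq_loop (cs : List Char) : scanLine cs = stripALoop cs false false :=
  scan_eq_loop_aux cs.length cs le_rfl

-- ===== VERDICT (by name: the statement is the Claim_ definition above) =====
theorem strip_lisp_comments_py_spec : Claim_equal_strip_lisp_comments_py := by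
  intro content _
  unfold Spec_strip_lisp_comments_py
  simp only [strip_lisp_comments_py, strip_lisp_comments_py_alt, scan_eq_loop]
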